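-- pv_equiv track=rewrite | github.com/titoe218/learning-python | lesson4/bai9.py | findMaxLettersCount
-- ===== SOURCE A (Python) =====
-- import collections
--
-- def findMaxLettersCount(arr: list):
--     result = []
--     for s in arr:
--         d = collections.defaultdict(int)
--         for c in s:
--             d[c]+=1
--         result.append(sorted(d.items(), key=lambda x: x[1], reverse=True)[0][0])
--     return result
-- ===== SOURCE B (Python) =====
-- def findMaxLettersCount(arr: list):
--     out = []
--     for s in arr:
--         best = s[0]
--         for c in s:
--             if s.count(c) > s.count(best):
--                 best = c
--         out.append(best)
--     return out
-- ===== Notes on version B (the rewrite author's own statement) =====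
-- stated objective: simpler
-- what changed: Replaces the per-string defaultdict frequency table plus a full descending sort of its items by a single running-best scan over the string using str.count, with strict '>' preserving the first-appearance tie-break; no dict, no sort, no import.
import Mathlib
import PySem

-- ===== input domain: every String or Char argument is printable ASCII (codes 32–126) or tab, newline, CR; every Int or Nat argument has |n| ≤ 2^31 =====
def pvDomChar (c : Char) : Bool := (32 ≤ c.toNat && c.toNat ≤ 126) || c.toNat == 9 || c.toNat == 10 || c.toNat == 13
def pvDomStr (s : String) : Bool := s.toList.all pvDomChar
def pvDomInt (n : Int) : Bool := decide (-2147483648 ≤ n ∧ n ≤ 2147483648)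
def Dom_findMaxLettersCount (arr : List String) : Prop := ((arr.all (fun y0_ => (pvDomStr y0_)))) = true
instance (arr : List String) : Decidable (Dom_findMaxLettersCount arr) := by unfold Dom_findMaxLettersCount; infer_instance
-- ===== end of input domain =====

-- B replaces A's per-string defaultdict table + descending sort of its items by a single
-- running-best scan with str.count (strict '>' keeps A's first-appearance tie-break); simpler.

-- ===== PORT A =====
def findMaxLettersCount (arr : List String) : List String :=
  arr.foldl (fun result s =>
    let d : PySem.Dict Char Int :=
      s.toList.foldl (fun d c => d.modify c 0 (· + 1)) PySem.Dict.empty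
    result ++ [match PySem.List.pyGet? (PySem.List.sorted d.items (fun x => x.2) true) 0 with
      | none => ""            -- Python raises IndexError here (empty string); excluded by Pre_
      | some p => String.ofList [p.1]]) []

-- ===== PORT B =====
def findMaxLettersCount_alt (arr : List String) : List String :=
  arr.foldl (fun out s =>
    out ++ [match PySem.Str.pyGet? s 0 with
      | none => ""            -- Python raises IndexError here (empty string); excluded by Pre_
      | some b0 => String.ofList [s.toList.foldl (fun best c =>
          if PySem.Str.count s (String.ofList [best]) < PySem.Str.count s (String.ofList [c])
          then c else best) b0]]) []

-- ===== PRECONDITION & SPEC =====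
-- Pre_ excludes exactly the lists containing an empty string, on which A (sorted(d.items())[0])
-- and B (s[0]) both raise IndexError.
def Pre_findMaxLettersCount (arr : List String) : Prop := ∀ s ∈ arr, s ≠ ""
instance (arr : List String) : Decidable (Pre_findMaxLettersCount arr) := by unfold Pre_findMaxLettersCount; infer_instance
def pvWitness_findMaxLettersCount : List String := ["ab", "cddc"]
def Spec_findMaxLettersCount (arr : List String) (out : List String) : Prop := out = findMaxLettersCount_alt arr
instance (arr : List String) (out : List String) : Decidable (Spec_findMaxLettersCount arr out) := by unfold Spec_findMaxLettersCount; infer_instance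

-- ===== CLAIM (what is proved, stated in full; the proofs are below) =====
def Claim_equal_findMaxLettersCount : Prop := ∀ (arr : List String), Dom_findMaxLettersCount arr → Pre_findMaxLettersCount arr → Spec_findMaxLettersCount arr (findMaxLettersCount arr)

-- ===== LEMMAS AND PROOFS =====
def pvStep (l : List Char) (b c : Char) : Char := if l.count b < l.count c then c else b
def pvPStep (b x : Char × Int) : Char × Int := if b.2 < x.2 then x else b

theorem pvHeadInsertFold : ∀ (ps : List (Char × Int)) (acc : List (Char × Int)) (b : Char × Int),
    acc.head? = some b →
    (ps.foldl (fun acc x => PySem.List.insertBy (fun a b => decide (b.2 < a.2)) x acc) acc).head?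
      = some (ps.foldl pvPStep b) := by
  intro ps
  induction ps with
  | nil => intro acc b h; simpa using h
  | cons x ps ih =>
    intro acc b h
    cases acc with
    | nil => simp at h
    | cons a rest =>
      have hb : b = a := by simpa using h.symm
      subst hb
      simp only [List.foldl_cons]
      have hh : (PySem.List.insertBy (fun a b => decide (b.2 < a.2)) x (b :: rest)).head?
          = some (pvPStep b x) := by
        simp only [PySem.List.insertBy, pvPStep]
        by_cases hlt : b.2 < x.2 <;> simp [hlt]
      exact ih _ _ hh

theorem pvMapFold (l : List Char) : ∀ (xs : List Char) (b : Char),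
    (xs.map (fun k => (k, (l.count k : Int)))).foldl pvPStep (b, (l.count b : Int))
      = (xs.foldl (pvStep l) b, (l.count (xs.foldl (pvStep l) b) : Int)) := by
  intro xs
  induction xs with
  | nil => intro b; simp
  | cons x xs ih =>
    intro b
    simp only [List.map_cons, List.foldl_cons]
    have hst : pvPStep (b, (l.count b : Int)) (x, (l.count x : Int))
        = (pvStep l b x, (l.count (pvStep l b x) : Int)) := by
      simp only [pvPStep, pvStep]
      by_cases hlt : l.count b < l.count x
      · simp [hlt, (by exact_mod_cast hlt : (l.count b : Int) < l.count x)]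
      · simp [hlt, (by exact_mod_cast hlt : ¬ ((l.count b : Int) < l.count x))]
    rw [hst, ih]

theorem pvPrefixFoldAdd : ∀ (t s : List Char), s <+: t.foldl PySem.Set.add s := by
  intro t
  induction t with
  | nil => intro s; simp
  | cons x t ih =>
    intro s
    simp only [List.foldl_cons]
    refine List.IsPrefix.trans ?_ (ih _)
    simp only [PySem.Set.add]
    split <;> simp

theorem pvCore (l : List Char) : ∀ (t s : List Char) (b : Char),
    (∀ x ∈ s, l.count x ≤ l.count b) →
    ∀ r, t.foldl PySem.Set.add s = s ++ r →
    t.foldl (pvStep l) b = r.foldl (pvStep l) b := by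
  intro t
  induction t with
  | nil =>
    intro s b _ r hr
    simp only [List.foldl_nil] at hr ⊢
    obtain rfl : r = [] := (List.append_cancel_left (by simpa using hr : s ++ [] = s ++ r)).symm
    simp
  | cons x t ih =>
    intro s b hseen r hr
    simp only [List.foldl_cons] at hr ⊢
    by_cases hmem : x ∈ s
    · have hstep : pvStep l b x = b := by
        simp [pvStep, Nat.not_lt.mpr (hseen x hmem)]
      rw [hstep]
      have hadd : PySem.Set.add s x = s := by simp [PySem.Set.add, hmem]
      rw [hadd] at hr
      exact ih s b hseen r hr
    · have hadd : PySem.Set.add s x = s ++ [x] := by simp [PySem.Set.add, hmem]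
      rw [hadd] at hr
      obtain ⟨r', hr'⟩ := pvPrefixFoldAdd t (s ++ [x])
      rw [← hr'] at hr
      have h2 : s ++ (x :: r') = s ++ r := by simpa using hr
      obtain rfl : r = x :: r' := (List.append_cancel_left h2).symm
      simp only [List.foldl_cons]
      apply ih (s ++ [x]) (pvStep l b x)
      · intro y hy
        simp only [List.mem_append, List.mem_singleton] at hy
        have hb : l.count b ≤ l.count (pvStep l b x) := by
          simp only [pvStep]; split <;> omega
        have hx : l.count x ≤ l.count (pvStep l b x) := by
          simp only [pvStep]; split <;> omega
        rcases hy with hy | rfl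
        · exact le_trans (hseen y hy) hb
        · exact hx
      · rw [hr']

theorem pvCountGo (c : Char) : ∀ (t : List Char) (fuel acc : Nat), t.length ≤ fuel →
    PySem.Chars.count.go [c] fuel t acc = acc + t.count c := by
  intro t
  induction t with
  | nil => intro fuel acc _; cases fuel <;> simp [PySem.Chars.count.go]
  | cons h t ih =>
    intro fuel acc hle
    cases fuel with
    | zero => simp at hle
    | succ f =>
      simp only [PySem.Chars.count.go]
      by_cases hc : c = h
      · subst hc
        simp [List.isPrefixOf, ih f (acc+1) (by simpa using hle)]
        omega
      · simp [List.isPrefixOf, hc, ih f acc (by simpa using hle), Ne.symm hc]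

theorem pvCountSingle (l : List Char) (c : Char) : PySem.Chars.count l [c] = l.count c := by
  simp [PySem.Chars.count, pvCountGo c l l.length 0 le_rfl]

theorem pvString (s : String) (hs : s ≠ "") :
    (match PySem.List.pyGet? (PySem.List.sorted
        (s.toList.foldl (fun d c => d.modify c 0 (· + 1)) (PySem.Dict.empty : PySem.Dict Char Int)).items
        (fun x => x.2) true) 0 with
      | none => ""
      | some p => String.ofList [p.1])
    = (match PySem.Str.pyGet? s 0 with
      | none => ""
      | some b0 => String.ofList [s.toList.foldl (fun best c =>
          if PySem.Str.count s (String.ofList [best]) < PySem.Str.count s (String.ofList [c])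
          then c else best) b0]) := by
  have hl : s.toList ≠ [] := fun h => hs (String.toList_eq_nil_iff.mp h)
  set l := s.toList with hldef
  obtain ⟨h, t, hlt⟩ := List.exists_cons_of_ne_nil hl
  -- B-side count function is pvStep for the fixed list l
  have hfun : (fun best c =>
      if PySem.Str.count s (String.ofList [best]) < PySem.Str.count s (String.ofList [c])
      then c else best) = pvStep l := by
    funext b c
    simp [PySem.Str.count_eq, String.toList_ofList, pvCountSingle, pvStep, ← hldef]
  -- B-side head
  have hB : PySem.Str.pyGet? s 0 = some h := by
    simp [PySem.Str.pyGet?, ← hldef, hlt, PySem.Chars.pyGet?, PySem.List.pyGet?, PySem.List.pyIdx?]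
  -- decompose Set.ofList l
  obtain ⟨r, hr⟩ := pvPrefixFoldAdd t [h]
  have hofl : PySem.Set.ofList l = h :: r := by
    rw [hlt]
    simp only [PySem.Set.ofList, List.foldl_cons]
    have : PySem.Set.add PySem.Set.empty h = [h] := by
      simp [PySem.Set.add, PySem.Set.empty, PySem.Set.contains]
    rw [this, ← hr]
    rfl
  -- A-side dict is the counter
  rw [← PySem.Dict.counter_eq_foldl, PySem.Dict.items_counter, hofl]
  rw [PySem.List.sorted_rev_eq_foldl_insertBy]
  -- head of the insertion fold
  have hA : (((h :: r).map (fun k => (k, (l.count k : Int)))).foldl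
      (fun acc x => PySem.List.insertBy (fun a b => decide ((fun x : Char × Int => x.2) b < (fun x : Char × Int => x.2) a)) x acc) []).head?
      = some (r.foldl (pvStep l) h, (l.count (r.foldl (pvStep l) h) : Int)) := by
    simp only [List.map_cons, List.foldl_cons]
    have h1 : PySem.List.insertBy (fun a b => decide ((b : Char × Int).2 < a.2)) (h, (l.count h : Int)) [] = [(h, (l.count h : Int))] := by
      simp [PySem.List.insertBy]
    rw [h1, pvHeadInsertFold _ [(h, (l.count h : Int))] (h, (l.count h : Int)) rfl, pvMapFold]
  have hget : PySem.List.pyGet? (((h :: r).map (fun k => (k, (l.count k : Int)))).foldl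
      (fun acc x => PySem.List.insertBy (fun a b => decide ((fun x : Char × Int => x.2) b < (fun x : Char × Int => x.2) a)) x acc) []) 0
      = some (r.foldl (pvStep l) h, (l.count (r.foldl (pvStep l) h) : Int)) := by
    rw [← hA]
    simp [pysem]
    exact List.head?_eq_getElem?.symm
  rw [hget, hB]
  simp only [hfun]
  -- B-side fold over the whole string = fold over t, then pvCore
  have hBfold : l.foldl (pvStep l) h = r.foldl (pvStep l) h := by
    rw [hlt]
    simp only [List.foldl_cons]
    have hhh : pvStep (h :: t) h h = h := by simp [pvStep]
    rw [hhh]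
    exact pvCore (h :: t) t [h] h (by intro x hx; simp at hx; subst hx; rfl) r hr.symm
  rw [hBfold]

-- ===== VERDICT (by name: the statement is the Claim_ definition above) =====
theorem findMaxLettersCount_spec : Claim_equal_findMaxLettersCount := by
  intro arr _ hpre
  unfold Spec_findMaxLettersCount findMaxLettersCount findMaxLettersCount_alt
  rw [PySem.List.foldl_append_singleton_eq_map, PySem.List.foldl_append_singleton_eq_map]
  exact List.map_congr_left (fun s hsmem => pvString s (hpre s hsmem))
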